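-- pv_equiv track=rewrite | github.com/IorenzoLF/Le_Refuge | Le_refuge/tools/maintenance/optimiseur_temples_dominants.py | _creer_connexions_outils_internes
-- ===== SOURCE A (Python) =====
-- def _creer_connexions_outils_internes(groupes):
--     connexions = []
--     for i, (groupe1, elements1) in enumerate(groupes.items()):
--         for j, (groupe2, elements2) in enumerate(groupes.items()):
--             if i < j and elements1 and elements2:
--                 connexions.append({
--                     "source": groupe1,
--                     "cible": groupe2,
--                     "type": "optimisation_outils",
--                     "force": "forte"
--                 })
--     return connexions
-- ===== SOURCE B (Python) =====
-- def _creer_connexions_outils_internes(groupes):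
--     noms = [groupe for groupe, elements in groupes.items() if elements]
--     connexions = []
--     reste = noms
--     while reste:
--         source, reste = reste[0], reste[1:]
--         for cible in reste:
--             connexions.append({
--                 "source": source,
--                 "cible": cible,
--                 "type": "optimisation_outils",
--                 "force": "forte"
--             })
--     return connexions
-- ===== Notes on version B (the rewrite author's own statement) =====
-- stated objective: simpler
-- what changed: Instead of a full n-by-n nested scan over enumerate(items) guarded by i<j and emptiness tests, B first filters the non-empty group names in one pass and then pairs each name with the remaining suffix, so the index comparison and the repeated emptiness checks disappear.
import Mathlib
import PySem

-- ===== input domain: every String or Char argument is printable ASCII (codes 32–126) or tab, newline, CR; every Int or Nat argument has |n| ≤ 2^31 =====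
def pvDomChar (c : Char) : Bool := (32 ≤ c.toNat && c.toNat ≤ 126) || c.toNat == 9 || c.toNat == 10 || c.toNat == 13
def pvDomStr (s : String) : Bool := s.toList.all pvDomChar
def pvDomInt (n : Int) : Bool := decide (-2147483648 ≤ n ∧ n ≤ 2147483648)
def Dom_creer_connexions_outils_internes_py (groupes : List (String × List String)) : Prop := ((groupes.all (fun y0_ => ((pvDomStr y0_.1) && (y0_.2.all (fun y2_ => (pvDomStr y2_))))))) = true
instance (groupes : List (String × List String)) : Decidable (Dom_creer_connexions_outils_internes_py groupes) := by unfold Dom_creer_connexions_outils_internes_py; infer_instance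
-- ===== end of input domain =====

-- B replaces A's full n×n nested scan (guarded by i<j and two emptiness tests) by
-- one filtering pass collecting the non-empty group names followed by a suffix-pairing
-- loop over that list; objective: simpler.

-- ===== PORT A =====
-- literal port of A's nested enumerate loops with the i<j ∧ truthiness guard
def creer_connexions_outils_internes_py (groupes : List (String × List String)) : List (List (String × String)) :=
  (PySem.List.enumerate groupes 0).foldl (fun connexions p1 =>
    (PySem.List.enumerate groupes 0).foldl (fun connexions p2 =>
      if p1.1 < p2.1 ∧ p1.2.2 ≠ [] ∧ p2.2.2 ≠ [] then
        connexions ++ [[("source", p1.2.1), ("cible", p2.2.1),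
                        ("type", "optimisation_outils"), ("force", "forte")]]
      else connexions) connexions) []

-- ===== PORT B =====
-- the while loop of Source B: peel the first remaining name, pair it with the rest
def pvPairsLoop : List String → List (List (String × String)) → List (List (String × String))
  | [], connexions => connexions
  | source :: reste, connexions =>
      pvPairsLoop reste
        (reste.foldl (fun c cible =>
          c ++ [[("source", source), ("cible", cible),
                 ("type", "optimisation_outils"), ("force", "forte")]]) connexions)

def creer_connexions_outils_internes_py_alt (groupes : List (String × List String)) : List (List (String × String)) :=
  pvPairsLoop ((groupes.filter (fun p => !p.2.isEmpty)).map Prod.fst) []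

-- ===== PRECONDITION & SPEC =====
def Spec_creer_connexions_outils_internes_py (groupes : List (String × List String)) (out : List (List (String × String))) : Prop := out = creer_connexions_outils_internes_py_alt groupes
instance (groupes : List (String × List String)) (out : List (List (String × String))) : Decidable (Spec_creer_connexions_outils_internes_py groupes out) := by unfold Spec_creer_connexions_outils_internes_py; infer_instance

-- ===== CLAIM (what is proved, stated in full; the proofs are below) =====
def Claim_equal_creer_connexions_outils_internes_py : Prop := ∀ (groupes : List (String × List String)), Dom_creer_connexions_outils_internes_py groupes → Spec_creer_connexions_outils_internes_py groupes (creer_connexions_outils_internes_py groupes)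

-- ===== LEMMAS AND PROOFS =====

-- the connection record both programs append
def pvConn (a b : String) : List (String × String) :=
  [("source", a), ("cible", b), ("type", "optimisation_outils"), ("force", "forte")]

-- reference value: pair every name with the names after it
def pvSpecPairs : List String → List (List (String × String))
  | [] => []
  | x :: xs => xs.map (pvConn x) ++ pvSpecPairs xs

theorem pvPairsLoop_eq (l : List String) (acc : List (List (String × String))) :
    pvPairsLoop l acc = acc ++ pvSpecPairs l := by
  induction l generalizing acc with
  | nil => simp [pvPairsLoop, pvSpecPairs]
  | cons x xs ih =>
      rw [pvPairsLoop, ih, pvSpecPairs]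
      rw [PySem.List.foldl_append_singleton_eq_map]
      simp [pvConn]

-- A's inner loop with an empty elements1 appends nothing
theorem pvInner_empty (E : List (Int × (String × List String))) (i : Int) (g : String)
    (acc : List (List (String × String))) :
    E.foldl (fun c q =>
      if i < q.1 ∧ ([] : List String) ≠ [] ∧ q.2.2 ≠ [] then c ++ [pvConn g q.2.1] else c) acc
    = acc := by
  have hf : (fun (c : List (List (String × String))) (q : Int × (String × List String)) =>
        if i < q.1 ∧ ([] : List String) ≠ [] ∧ q.2.2 ≠ [] then c ++ [pvConn g q.2.1] else c)
      = fun c _ => c := by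
    funext c q
    rw [if_neg (by simp)]
  rw [hf]
  induction E generalizing acc with
  | nil => rfl
  | cons q E ih => exact ih acc

-- A's inner loop, emptiness test on elements1 dropped, collects the later non-empty groups
theorem pvInner' (E : List (Int × (String × List String))) (i : Int) (g : String)
    (acc : List (List (String × String))) :
    E.foldl (fun c q =>
      if i < q.1 ∧ q.2.2 ≠ [] then c ++ [pvConn g q.2.1] else c) acc
    = acc ++ (E.filter (fun q => decide (i < q.1) && decide (q.2.2 ≠ []))).map
        (fun q => pvConn g q.2.1) := by
  induction E generalizing acc with
  | nil => simp
  | cons q E ih =>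
      simp only [List.foldl_cons, List.filter_cons]
      by_cases h : i < q.1 ∧ q.2.2 ≠ []
      · have hb : (decide (i < q.1) && decide (q.2.2 ≠ [])) = true := by
          simp [h.1, h.2]
        rw [if_pos h, hb, if_pos rfl, List.map_cons, ih]
        simp
      · have hb : (decide (i < q.1) && decide (q.2.2 ≠ [])) = false := by
          rcases Decidable.not_and_iff_not_or_not.mp h with h1 | h2
          · simp [h1]
          · simp only [ne_eq, Decidable.not_not] at h2
            simp [h2]
        rw [if_neg h, hb]
        simp only [Bool.false_eq_true, if_false]
        exact ih acc

-- A's inner loop with a non-empty elements1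
theorem pvInner_nonempty (E : List (Int × (String × List String))) (i : Int) (g : String)
    (e : List String) (he : e ≠ []) (acc : List (List (String × String))) :
    E.foldl (fun c q =>
      if i < q.1 ∧ e ≠ [] ∧ q.2.2 ≠ [] then c ++ [pvConn g q.2.1] else c) acc
    = acc ++ (E.filter (fun q => decide (i < q.1) && decide (q.2.2 ≠ []))).map
        (fun q => pvConn g q.2.1) := by
  have hf : (fun (c : List (List (String × String))) (q : Int × (String × List String)) =>
        if i < q.1 ∧ e ≠ [] ∧ q.2.2 ≠ [] then c ++ [pvConn g q.2.1] else c)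
      = (fun c q => if i < q.1 ∧ q.2.2 ≠ [] then c ++ [pvConn g q.2.1] else c) := by
    funext c q
    by_cases h : i < q.1 ∧ q.2.2 ≠ []
    · rw [if_pos ⟨h.1, he, h.2⟩, if_pos h]
    · rw [if_neg (fun hc => h ⟨hc.1, hc.2.2⟩), if_neg h]
  rw [hf, pvInner']

-- once past index i, the i < j test is always true
theorem pvFilter_shift (xs : List (String × List String)) (t i : Int) (h : i < t) :
    (PySem.List.enumerate xs t).filter (fun q => decide (i < q.1) && decide (q.2.2 ≠ []))
    = (PySem.List.enumerate xs t).filter (fun q => decide (q.2.2 ≠ [])) := by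
  induction xs generalizing t with
  | nil => rfl
  | cons x xs ih =>
      rw [PySem.List.enumerate_cons]
      simp only [List.filter_cons]
      rw [ih (t + 1) (by omega)]
      simp [h]

theorem pvFilter_map (xs : List (String × List String)) (t : Int) (g : String) :
    ((PySem.List.enumerate xs t).filter (fun q => decide (q.2.2 ≠ []))).map
        (fun q => pvConn g q.2.1)
    = ((xs.filter (fun p => !p.2.isEmpty)).map Prod.fst).map (pvConn g) := by
  induction xs generalizing t with
  | nil => rfl
  | cons x xs ih =>
      rw [PySem.List.enumerate_cons, List.filter_cons, List.filter_cons]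
      by_cases h : x.2 = ([] : List String)
      · have e1 : decide (((t, x) : Int × (String × List String)).2.2 ≠ []) = false := by
          simp [h]
        have e2 : (!x.2.isEmpty) = false := by simp [h]
        rw [e1, e2]
        simp only [Bool.false_eq_true, if_false]
        exact ih (t + 1)
      · have e1 : decide (((t, x) : Int × (String × List String)).2.2 ≠ []) = true := by
          simp [h]
        have e2 : (!x.2.isEmpty) = true := by simp [h]
        rw [e1, e2, if_pos rfl, if_pos rfl, List.map_cons, List.map_cons, List.map_cons,
          ih (t + 1)]

theorem pvFlatMap_congr {α β : Type} (L : List α) (f g : α → List β)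
    (h : ∀ p ∈ L, f p = g p) : L.flatMap f = L.flatMap g := by
  induction L with
  | nil => rfl
  | cons x xs ih => simp [List.flatMap_cons, h x (by simp), ih (fun p hp => h p (by simp [hp]))]

-- contribution of outer-loop element (i, (g, e)) given the full enumerated list E
def pvContrib (E : List (Int × (String × List String))) (p : Int × (String × List String)) :
    List (List (String × String)) :=
  if p.2.2 = [] then []
  else (E.filter (fun q => decide (p.1 < q.1) && decide (q.2.2 ≠ []))).map
        (fun q => pvConn p.2.1 q.2.1)

theorem pvEnum_fst_ge (xs : List (String × List String)) (t : Int)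
    (p : Int × (String × List String)) (hp : p ∈ PySem.List.enumerate xs t) : t ≤ p.1 := by
  rw [PySem.List.mem_enumerate_iff] at hp
  obtain ⟨k, hk, rfl⟩ := hp
  omega

-- main characterisation of A's double loop, with a free starting index
theorem pvMain (xs : List (String × List String)) (s : Int) :
    (PySem.List.enumerate xs s).flatMap
        (fun p => pvContrib (PySem.List.enumerate xs s) p)
    = pvSpecPairs ((xs.filter (fun p => !p.2.isEmpty)).map Prod.fst) := by
  induction xs generalizing s with
  | nil => rfl
  | cons x xs ih =>
      rw [PySem.List.enumerate_cons, List.flatMap_cons]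
      have htail : (PySem.List.enumerate xs (s + 1)).flatMap
          (fun p => pvContrib ((s, x) :: PySem.List.enumerate xs (s + 1)) p)
          = (PySem.List.enumerate xs (s + 1)).flatMap
              (fun p => pvContrib (PySem.List.enumerate xs (s + 1)) p) := by
        apply pvFlatMap_congr
        intro p hp
        have hge := pvEnum_fst_ge xs (s + 1) p hp
        unfold pvContrib
        by_cases he : p.2.2 = ([] : List String)
        · simp [he]
        · rw [if_neg he, if_neg he, List.filter_cons]
          have hb : (decide (p.1 < ((s, x) : Int × (String × List String)).1) &&
              decide (((s, x) : Int × (String × List String)).2.2 ≠ [])) = false := by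
            have : ¬ (p.1 < s) := by omega
            simp [this]
          rw [hb]
          simp only [Bool.false_eq_true, if_false]
      rw [htail, ih (s + 1)]
      unfold pvContrib
      by_cases he : x.2 = ([] : List String)
      · rw [if_pos (show (((s, x) : Int × (String × List String)).2.2 = ([] : List String))
          from he), List.nil_append]
        have e2 : (!x.2.isEmpty) = false := by simp [he]
        rw [List.filter_cons, e2]
        simp only [Bool.false_eq_true, if_false]
      · rw [if_neg (show ¬ (((s, x) : Int × (String × List String)).2.2 = []) from he),
          List.filter_cons]
        have hb : (decide (((s, x) : Int × (String × List String)).1 <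
            ((s, x) : Int × (String × List String)).1) &&
            decide (((s, x) : Int × (String × List String)).2.2 ≠ [])) = false := by
          simp
        rw [hb]
        simp only [Bool.false_eq_true, if_false]
        rw [pvFilter_shift xs (s + 1) s (by omega), pvFilter_map xs (s + 1)]
        have e2 : (!x.2.isEmpty) = true := by simp [he]
        rw [List.filter_cons, e2, if_pos rfl, List.map_cons, pvSpecPairs]

-- fold A's outer loop into a flatMap over contributions
theorem pvOuter (groupes : List (String × List String))
    (E : List (Int × (String × List String))) (acc : List (List (String × String))) :
    E.foldl (fun connexions p1 =>
      (PySem.List.enumerate groupes 0).foldl (fun connexions p2 =>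
        if p1.1 < p2.1 ∧ p1.2.2 ≠ [] ∧ p2.2.2 ≠ [] then
          connexions ++ [[("source", p1.2.1), ("cible", p2.2.1),
                          ("type", "optimisation_outils"), ("force", "forte")]]
        else connexions) connexions) acc
    = acc ++ E.flatMap (fun p => pvContrib (PySem.List.enumerate groupes 0) p) := by
  induction E generalizing acc with
  | nil => simp
  | cons p E ih =>
      rw [List.foldl_cons, List.flatMap_cons, ih]
      have hstep : (PySem.List.enumerate groupes 0).foldl (fun connexions p2 =>
          if p.1 < p2.1 ∧ p.2.2 ≠ [] ∧ p2.2.2 ≠ [] then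
            connexions ++ [[("source", p.2.1), ("cible", p2.2.1),
                            ("type", "optimisation_outils"), ("force", "forte")]]
          else connexions) acc
          = acc ++ pvContrib (PySem.List.enumerate groupes 0) p := by
        unfold pvContrib
        by_cases he : p.2.2 = ([] : List String)
        · rw [if_pos he, List.append_nil]
          have h0 := pvInner_empty (PySem.List.enumerate groupes 0) p.1 p.2.1 acc
          rw [he]
          exact h0
        · rw [if_neg he]
          exact pvInner_nonempty (PySem.List.enumerate groupes 0) p.1 p.2.1 p.2.2 he acc
      rw [hstep, List.append_assoc]

theorem pvA_eq (groupes : List (String × List String)) :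
    creer_connexions_outils_internes_py groupes
    = (PySem.List.enumerate groupes 0).flatMap
        (fun p => pvContrib (PySem.List.enumerate groupes 0) p) := by
  unfold creer_connexions_outils_internes_py
  rw [pvOuter groupes (PySem.List.enumerate groupes 0) [], List.nil_append]

-- ===== VERDICT (by name: the statement is the Claim_ definition above) =====
theorem creer_connexions_outils_internes_py_spec : Claim_equal_creer_connexions_outils_internes_py := by
  intro groupes _
  unfold Spec_creer_connexions_outils_internes_py creer_connexions_outils_internes_py_alt
  rw [pvA_eq, pvMain, pvPairsLoop_eq, List.nil_append]
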